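-- pv_equiv track=rewrite | github.com/NealChanAI/algorithm | interview/matchup.py | continues_sub_seq
-- ===== SOURCE A (Python) =====
-- def continues_sub_seq(nums):
--     """
--     1. 非空判断
--     2.
--     """
--     n = len(nums)
--     if n < 2:
--         return 0
--
--     res = 0
--
--     for i in range(n):
--         for j in range(i+1, n):
--             sub_seq = nums[i: j+1]
--             cur_len = len(sub_seq)
--
--             if cur_len < 2:  # 长度小于2
--                 continue
--
--             if cur_len == 2:
--                 res += 1
--                 continue
--
--             is_valid = True
--             for k in range(1, cur_len-1):
--                 cur_val = sub_seq[k]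
--                 left_val = sub_seq[k-1]
--                 right_val = sub_seq[k+1]
--
--                 if not ((left_val > cur_val and right_val > cur_val) or (left_val < cur_val or right_val < cur_val)):
--                     is_valid = False
--                     break
--
--             if is_valid:
--                 res += 1
--
--     return res
-- ===== SOURCE B (Python) =====
-- def continues_sub_seq(nums):
--     # O(n): a subarray nums[i..j] is invalid iff it contains an interior index t
--     # (i < t < j) whose triple (nums[t-1], nums[t], nums[t+1]) fails the local test.
--     # Scan right-to-left keeping the nearest such "bad" interior index; the valid
--     # end positions for start i are exactly i+1 .. nxt, contributing nxt - i.
--     n = len(nums)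
--     if n < 2:
--         return 0
--     res = 0
--     nxt = n - 1
--     for i in range(n - 2, -1, -1):
--         t = i + 1
--         if t + 1 < n:
--             a, b, c = nums[t - 1], nums[t], nums[t + 1]
--             if a >= b and c >= b and (a == b or c == b):
--                 nxt = t
--         res += nxt - i
--     return res
-- ===== Notes on version B (the rewrite author's own statement) =====
-- stated objective: faster
-- what changed: A enumerates every subarray and re-scans its interior (with slicing) for a locally-bad element; B precomputes nothing per subarray: one right-to-left pass tracks the nearest bad interior index, and each start i contributes next_bad(i) - i valid subarrays in O(1).
import Mathlib
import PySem

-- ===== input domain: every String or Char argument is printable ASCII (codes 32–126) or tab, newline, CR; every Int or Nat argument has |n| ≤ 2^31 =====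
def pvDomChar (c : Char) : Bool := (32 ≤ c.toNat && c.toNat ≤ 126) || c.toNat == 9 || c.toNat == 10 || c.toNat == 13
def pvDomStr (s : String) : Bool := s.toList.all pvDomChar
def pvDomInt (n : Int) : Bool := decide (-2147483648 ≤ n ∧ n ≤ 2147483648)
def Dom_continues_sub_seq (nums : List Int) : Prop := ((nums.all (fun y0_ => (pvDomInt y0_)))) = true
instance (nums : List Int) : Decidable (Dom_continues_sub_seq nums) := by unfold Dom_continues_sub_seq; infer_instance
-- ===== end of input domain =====

-- B replaces A's O(n^3) all-subarray re-scan by one right-to-left pass tracking the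
-- nearest "bad" interior index (objective: faster).

-- ===== PORT A =====
-- xs[k]: every call site below indexes in range, where pyGetD is exact
def pvIdx (xs : List Int) (k : Int) : Int := PySem.List.pyGetD xs k 0

-- the 'for k in range(1, cur_len-1)' loop with its break, returning is_valid
def pvKLoop (sub : List Int) : List Int → Bool
  | [] => true
  | k :: ks =>
    let cur := pvIdx sub k
    let left := pvIdx sub (k - 1)
    let right := pvIdx sub (k + 1)
    if ¬ ((left > cur ∧ right > cur) ∨ (left < cur ∨ right < cur)) then false
    else pvKLoop sub ks

def continues_sub_seq (nums : List Int) : Int :=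
  let n : Int := (nums.length : Int)
  if n < 2 then 0
  else
    (PySem.List.pyRange 0 n 1).foldl (fun res i =>
      (PySem.List.pyRange (i + 1) n 1).foldl (fun res j =>
        let sub := PySem.List.slice nums (some i) (some (j + 1))
        let curLen : Int := (sub.length : Int)
        if curLen < 2 then res
        else if curLen = 2 then res + 1
        else if pvKLoop sub (PySem.List.pyRange 1 (curLen - 1) 1) then res + 1 else res
      ) res
    ) 0

-- ===== PORT B =====
def continues_sub_seq_alt (nums : List Int) : Int :=
  let n : Int := (nums.length : Int)
  if n < 2 then 0
  else
    ((PySem.List.pyRange (n - 2) (-1) (-1)).foldl (fun (st : Int × Int) i =>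
        let t := i + 1
        let nxt :=
          if t + 1 < n then
            let a := pvIdx nums (t - 1)
            let b := pvIdx nums t
            let c := pvIdx nums (t + 1)
            if a ≥ b ∧ c ≥ b ∧ (a = b ∨ c = b) then t else st.2
          else st.2
        (st.1 + (nxt - i), nxt)
      ) (0, n - 1)).1

-- ===== PRECONDITION & SPEC =====
def Spec_continues_sub_seq (nums : List Int) (out : Int) : Prop := out = continues_sub_seq_alt nums
instance (nums : List Int) (out : Int) : Decidable (Spec_continues_sub_seq nums out) := by unfold Spec_continues_sub_seq; infer_instance

-- ===== CLAIM (what is proved, stated in full; the proofs are below) =====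
def Claim_equal_continues_sub_seq : Prop := ∀ (nums : List Int), Dom_continues_sub_seq nums → Spec_continues_sub_seq nums (continues_sub_seq nums)

-- ===== LEMMAS AND PROOFS =====

-- an interior index t of nums is "bad" iff it invalidates every subarray containing t-1,t,t+1
def nbad (nums : List Int) (t : Nat) : Bool :=
  decide (nums.getD (t - 1) 0 ≥ nums.getD t 0 ∧ nums.getD (t + 1) 0 ≥ nums.getD t 0 ∧
          (nums.getD (t - 1) 0 = nums.getD t 0 ∨ nums.getD (t + 1) 0 = nums.getD t 0))

-- first bad index in s, s+1, … (fuel many candidates), else nums.length - 1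
def nxtGo (nums : List Int) (s : Nat) : Nat → Nat
  | 0 => nums.length - 1
  | fuel + 1 => if nbad nums s then s else nxtGo nums (s + 1) fuel

-- first bad interior index after i, else nums.length - 1
def nxtN (nums : List Int) (i : Nat) : Nat := nxtGo nums (i + 1) (nums.length - 2 - i)

def termG (nums : List Int) (i : Nat) : Int := (nxtN nums i : Int) - (i : Int)

-- A's validity of the subarray nums[i..j] (inclusive): no bad interior index
def validB (nums : List Int) (i j : Nat) : Bool :=
  (List.range' (i + 1) (j - (i + 1))).all (fun t => ! nbad nums t)

theorem nxtGo_spec (nums : List Int) (s fuel : Nat) (h : s + fuel = nums.length - 1) :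
    s ≤ nxtGo nums s fuel ∧ nxtGo nums s fuel ≤ nums.length - 1 ∧
    (∀ t, s ≤ t → t < nxtGo nums s fuel → nbad nums t = false) ∧
    (nxtGo nums s fuel < nums.length - 1 → nbad nums (nxtGo nums s fuel) = true) := by
  induction fuel generalizing s with
  | zero =>
    simp only [nxtGo]
    exact ⟨by omega, by omega, fun t ht1 ht2 => absurd ht2 (by omega), fun hlt => absurd hlt (by omega)⟩
  | succ fuel ih =>
    by_cases hb : nbad nums s = true
    · simp only [nxtGo, if_pos hb]
      exact ⟨le_refl s, by omega, fun t ht1 ht2 => absurd ht2 (by omega), fun _ => hb⟩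
    · have ihs := ih (s + 1) (by omega)
      simp only [nxtGo, if_neg hb]
      refine ⟨by omega, ihs.2.1, ?_, ihs.2.2.2⟩
      intro t ht1 ht2
      rcases Nat.eq_or_lt_of_le ht1 with rfl | h'
      · simpa using hb
      · exact ihs.2.2.1 t (by omega) ht2

theorem nxt_bounds (nums : List Int) (i : Nat) (hi : i ≤ nums.length - 2) (hn : 2 ≤ nums.length) :
    i + 1 ≤ nxtN nums i ∧ nxtN nums i ≤ nums.length - 1 :=
  ⟨(nxtGo_spec nums (i+1) (nums.length - 2 - i) (by omega)).1,
   (nxtGo_spec nums (i+1) (nums.length - 2 - i) (by omega)).2.1⟩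

theorem valid_iff (nums : List Int) (i j : Nat) (hn : 2 ≤ nums.length)
    (hi : i ≤ nums.length - 2) (hj1 : i + 1 ≤ j) (hj2 : j ≤ nums.length - 1) :
    validB nums i j = decide (j ≤ nxtN nums i) := by
  obtain ⟨h1, h2, h3, h4⟩ := nxtGo_spec nums (i+1) (nums.length - 2 - i) (by omega)
  have hN : nxtN nums i = nxtGo nums (i+1) (nums.length - 2 - i) := rfl
  have key : validB nums i j = true ↔ j ≤ nxtN nums i := by
    unfold validB
    simp only [List.all_eq_true, List.mem_range'_1, Bool.not_eq_eq_eq_not, Bool.not_true]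
    constructor
    · intro hall
      by_contra hlt
      have hlt' : nxtGo nums (i+1) (nums.length - 2 - i) < j := by omega
      have hb := h4 (by omega)
      have hf := hall (nxtGo nums (i+1) (nums.length - 2 - i)) ⟨by omega, by omega⟩
      rw [hf] at hb; cases hb
    · rintro hle t ⟨ht1, ht2⟩
      exact h3 t ht1 (by omega)
  by_cases hd : j ≤ nxtN nums i
  · simp [hd, key.mpr hd]
  · simp only [hd, decide_false]
    rw [← Bool.not_eq_true]
    intro hv; exact hd (key.mp hv)

theorem countP_lt_range (N m : Nat) : (List.range N).countP (fun k => decide (k < m)) = min m N := by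
  induction N with
  | zero => simp
  | succ N ih =>
    rw [List.range_succ, List.countP_append, ih]
    by_cases h : N < m <;> simp [h] <;> omega

-- pvKLoop (a loop with break) is List.all
theorem kloop_eq_all (sub : List Int) (l : List Int) :
    pvKLoop sub l = l.all (fun k =>
      decide ((pvIdx sub (k - 1) > pvIdx sub k ∧ pvIdx sub (k + 1) > pvIdx sub k) ∨
        (pvIdx sub (k - 1) < pvIdx sub k ∨ pvIdx sub (k + 1) < pvIdx sub k))) := by
  induction l with
  | nil => rfl
  | cons k ks ih =>
    simp only [pvKLoop, List.all_cons, ih]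
    by_cases h : (pvIdx sub (k - 1) > pvIdx sub k ∧ pvIdx sub (k + 1) > pvIdx sub k) ∨
        (pvIdx sub (k - 1) < pvIdx sub k ∨ pvIdx sub (k + 1) < pvIdx sub k) <;> simp [h]

-- indexing into the slice nums[i:j+1]
theorem getD_slice (nums : List Int) (i j k : Nat) (hk : k < j + 1 - i) (hj : j < nums.length) :
    ((nums.drop i).take (j + 1 - i)).getD k 0 = nums.getD (i + k) 0 := by
  rw [List.getD_eq_getElem?_getD, List.getD_eq_getElem?_getD, List.getElem?_take, if_pos hk,
    List.getElem?_drop]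

-- A's inner j-loop body, at a Nat j with i ≤ j - 1 < n - 1, adds the validity indicator
-- pointwise: A's pass-test on the slice at offset 1+k is the negation of nbad at i+1+k
theorem pass_at (nums : List Int) (i j k : Nat) (hij : i + 2 ≤ j) (hj : j < nums.length)
    (hk : k < j - i - 1) :
    (decide ((pvIdx ((nums.drop i).take (j + 1 - i)) ((1 + (k:Int)) - 1) > pvIdx ((nums.drop i).take (j + 1 - i)) (1 + (k:Int)) ∧
              pvIdx ((nums.drop i).take (j + 1 - i)) ((1 + (k:Int)) + 1) > pvIdx ((nums.drop i).take (j + 1 - i)) (1 + (k:Int))) ∨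
             (pvIdx ((nums.drop i).take (j + 1 - i)) ((1 + (k:Int)) - 1) < pvIdx ((nums.drop i).take (j + 1 - i)) (1 + (k:Int)) ∨
              pvIdx ((nums.drop i).take (j + 1 - i)) ((1 + (k:Int)) + 1) < pvIdx ((nums.drop i).take (j + 1 - i)) (1 + (k:Int))))) =
    ! nbad nums (i + 1 + k) := by
  have e0 : (1 + (k:Int)) - 1 = ((k : Nat) : Int) := by omega
  have e1 : (1 + (k:Int)) = ((k + 1 : Nat) : Int) := by omega
  have e2 : (1 + (k:Int)) + 1 = ((k + 2 : Nat) : Int) := by omega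
  rw [e2, e0, e1]
  unfold pvIdx
  rw [PySem.List.pyGetD_natCast, PySem.List.pyGetD_natCast, PySem.List.pyGetD_natCast,
    getD_slice nums i j k (by omega) hj, getD_slice nums i j (k+1) (by omega) hj,
    getD_slice nums i j (k+2) (by omega) hj]
  unfold nbad
  rw [← decide_not]
  apply decide_eq_decide.mpr
  rw [show i + 1 + k - 1 = i + k from by omega, show i + (k+1) = i + 1 + k from by omega,
    show i + (k+2) = i + 1 + k + 1 from by omega]
  omega

theorem bodyA_char (nums : List Int) (i j : Nat) (hij : i + 1 ≤ j) (hj : j < nums.length) (res : Int) :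
    (let sub := PySem.List.slice nums (some (i : Int)) (some ((j : Int) + 1))
     let curLen : Int := (sub.length : Int)
     if curLen < 2 then res
     else if curLen = 2 then res + 1
     else if pvKLoop sub (PySem.List.pyRange 1 (curLen - 1) 1) then res + 1 else res) =
    (if validB nums i j then res + 1 else res) := by
  dsimp only
  rw [show (j:Int) + 1 = ((j + 1 : Nat) : Int) from by omega, PySem.List.slice_natCast,
    show ((nums.drop i).take (j + 1 - i)).length = j + 1 - i from by
      simp [List.length_take, List.length_drop]; omega]
  rw [if_neg (by omega : ¬ ((j + 1 - i : Nat) : Int) < 2)]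
  by_cases hje : j = i + 1
  · subst hje
    rw [if_pos (by omega : ((i + 1 + 1 - i : Nat) : Int) = 2)]
    rw [if_pos (by unfold validB; rw [show i + 1 - (i + 1) = 0 from by omega]; rfl)]
  · rw [if_neg (by omega : ¬ ((j + 1 - i : Nat) : Int) = 2)]
    have hij2 : i + 2 ≤ j := by omega
    have hk : pvKLoop ((nums.drop i).take (j + 1 - i))
        (PySem.List.pyRange 1 (((j + 1 - i : Nat) : Int) - 1) 1) = validB nums i j := by
      rw [kloop_eq_all, PySem.List.pyRange_one, List.all_map,
        show ((((j + 1 - i : Nat) : Int) - 1) - 1).toNat = j - i - 1 from by omega]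
      unfold validB
      rw [show j - (i + 1) = j - i - 1 from by omega, List.range'_eq_map_range, List.all_map]
      refine Bool.coe_iff_coe.mp ?_
      simp only [List.all_eq_true, List.mem_range, Function.comp]
      constructor
      · intro h k hkr
        have h2 := h k hkr
        rw [pass_at nums i j k hij2 hj hkr] at h2
        exact h2
      · intro h k hkr
        rw [pass_at nums i j k hij2 hj hkr]
        exact h k hkr
    rw [hk]

theorem nxt_ge (nums : List Int) (i : Nat) (h : nums.length - 2 ≤ i) :
    nxtN nums i = nums.length - 1 := by
  unfold nxtN
  rw [show nums.length - 2 - i = 0 from by omega]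
  rfl

theorem nxt_step (nums : List Int) (m : Nat) (hm : m < nums.length - 2) :
    nxtN nums m = if nbad nums (m + 1) then m + 1 else nxtN nums (m + 1) := by
  unfold nxtN
  rw [show nums.length - 2 - m = (nums.length - 2 - (m + 1)) + 1 from by omega]
  rfl

-- A's inner j-loop adds exactly nxtN i - i
theorem inner_eq (nums : List Int) (hn : 2 ≤ nums.length) (i : Nat) (hi : i ≤ nums.length - 2)
    (res : Int) :
    (PySem.List.pyRange ((i : Int) + 1) ((nums.length : Int)) 1).foldl (fun res j =>
        let sub := PySem.List.slice nums (some (i : Int)) (some (j + 1))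
        let curLen : Int := (sub.length : Int)
        if curLen < 2 then res
        else if curLen = 2 then res + 1
        else if pvKLoop sub (PySem.List.pyRange 1 (curLen - 1) 1) then res + 1 else res) res
      = res + termG nums i := by
  rw [PySem.List.foldl_congr_mem _ _ (fun res j => if validB nums i j.toNat then res + 1 else res) _ ?hcong]
  case hcong =>
    intro acc j hj
    rw [PySem.List.mem_pyRange_one] at hj
    rw [show j = ((j.toNat : Nat) : Int) from by omega]
    have := bodyA_char nums i j.toNat (by omega) (by omega) acc
    simp only [Int.toNat_natCast]
    exact this
  simp only [PySem.List.foldl_if_add_one (fun j : Int => validB nums i j.toNat)]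
  have hb := nxt_bounds nums i hi hn
  rw [PySem.List.pyRange_one, List.countP_map,
    show (((nums.length : Int)) - ((i : Int) + 1)).toNat = nums.length - 1 - i from by omega]
  rw [List.countP_congr (q := fun k => decide (k < nxtN nums i - i)) ?hq]
  case hq =>
    intro k hkmem
    rw [List.mem_range] at hkmem
    simp only [Function.comp]
    rw [show ((i : Int) + 1 + (k : Int)).toNat = i + 1 + k from by omega]
    rw [valid_iff nums i (i + 1 + k) hn hi (by omega) (by omega)]
    simp only [decide_eq_true_eq]
    omega
  rw [countP_lt_range]
  unfold termG
  rw [show min (nxtN nums i - i) (nums.length - 1 - i) = nxtN nums i - i from by omega]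
  omega

-- B's loop body (the lambda of the port, named for the invariant proof)
def bBody (nums : List Int) : (Int × Int) → Int → (Int × Int) := fun st i =>
  let t := i + 1
  let nxt :=
    if t + 1 < (nums.length : Int) then
      if pvIdx nums (t - 1) ≥ pvIdx nums t ∧ pvIdx nums (t + 1) ≥ pvIdx nums t ∧
         (pvIdx nums (t - 1) = pvIdx nums t ∨ pvIdx nums (t + 1) = pvIdx nums t) then t else st.2
    else st.2
  (st.1 + (nxt - i), nxt)

-- B's nxt update at i = m turns nxtN (m+1) into nxtN m
theorem bnxt_eq (nums : List Int) (hn : 2 ≤ nums.length) (m : Nat) (hm : m ≤ nums.length - 2) :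
    (if ((m : Int) + 1) + 1 < (nums.length : Int) then
        (if pvIdx nums (((m : Int) + 1) - 1) ≥ pvIdx nums ((m : Int) + 1) ∧
            pvIdx nums (((m : Int) + 1) + 1) ≥ pvIdx nums ((m : Int) + 1) ∧
            (pvIdx nums (((m : Int) + 1) - 1) = pvIdx nums ((m : Int) + 1) ∨
             pvIdx nums (((m : Int) + 1) + 1) = pvIdx nums ((m : Int) + 1))
         then (m : Int) + 1 else ((nxtN nums (m + 1) : Nat) : Int))
      else ((nxtN nums (m + 1) : Nat) : Int)) = ((nxtN nums m : Nat) : Int) := by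
  by_cases hend : m = nums.length - 2
  · subst hend
    rw [if_neg (by omega)]
    rw [nxt_ge nums (nums.length - 2 + 1) (by omega), nxt_ge nums (nums.length - 2) (by omega)]
  · have hmlt : m < nums.length - 2 := by omega
    rw [if_pos (by omega), nxt_step nums m hmlt]
    have e0 : ((m : Int) + 1) - 1 = ((m : Nat) : Int) := by omega
    have e1 : ((m : Int) + 1) = ((m + 1 : Nat) : Int) := by omega
    have e2 : ((m : Int) + 1) + 1 = ((m + 2 : Nat) : Int) := by omega
    rw [e2, e0, e1]
    unfold pvIdx
    rw [PySem.List.pyGetD_natCast, PySem.List.pyGetD_natCast, PySem.List.pyGetD_natCast]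
    unfold nbad
    rw [show m + 1 - 1 = m from by omega, show m + 1 + 1 = m + 2 from by omega]
    by_cases hc : nums.getD m 0 ≥ nums.getD (m + 1) 0 ∧ nums.getD (m + 2) 0 ≥ nums.getD (m + 1) 0 ∧
        (nums.getD m 0 = nums.getD (m + 1) 0 ∨ nums.getD (m + 2) 0 = nums.getD (m + 1) 0)
    · rw [if_pos hc, if_pos (decide_eq_true hc)]
    · rw [if_neg hc, if_neg (by simpa using hc)]

-- invariant of B's right-to-left pass
theorem b_inv (nums : List Int) (hn : 2 ≤ nums.length) (m : Nat) :
    ∀ (r : Int), m ≤ nums.length - 2 →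
    (PySem.List.pyRange ((m : Int)) (-1) (-1)).foldl (bBody nums) (r, ((nxtN nums (m + 1) : Nat) : Int))
      = (r + ((List.range (m + 1)).map (termG nums)).sum, ((nxtN nums 0 : Nat) : Int)) := by
  induction m with
  | zero =>
    intro r hm
    rw [PySem.List.pyRange_neg_one_cons (by omega), PySem.List.pyRange_neg_one_eq_nil (by omega)]
    dsimp only [List.foldl_cons, List.foldl_nil, bBody]
    rw [bnxt_eq nums hn 0 (by omega)]
    simp [termG]
  | succ m ih =>
    intro r hm
    rw [PySem.List.pyRange_neg_one_cons (by omega), List.foldl_cons]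
    dsimp only [bBody]
    rw [bnxt_eq nums hn (m + 1) hm]
    rw [show ((m + 1 : Nat) : Int) - 1 = ((m : Nat) : Int) from by omega]
    rw [ih (r + (((nxtN nums (m + 1) : Nat) : Int) - ((m + 1 : Nat) : Int))) (by omega)]
    rw [show List.range (m + 1 + 1) = List.range (m + 1) ++ [m + 1] from List.range_succ,
      List.map_append, List.sum_append]
    simp only [Prod.mk.injEq, List.map_cons, List.map_nil, List.sum_cons, List.sum_nil]
    exact ⟨by unfold termG; ring, trivial⟩

theorem main_eq (nums : List Int) : continues_sub_seq nums = continues_sub_seq_alt nums := by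
  unfold continues_sub_seq continues_sub_seq_alt
  dsimp only
  by_cases hn2 : (nums.length : Int) < 2
  · rw [if_pos hn2, if_pos hn2]
  · have hn : 2 ≤ nums.length := by omega
    rw [if_neg hn2, if_neg hn2]
    -- A side: outer loop is a sum of termG over 0..n-1
    rw [PySem.List.foldl_congr_mem _ _ (fun res i => res + termG nums i.toNat) _ ?houter]
    case houter =>
      intro acc x hx
      rw [PySem.List.mem_pyRange_one] at hx
      by_cases hxe : x.toNat ≤ nums.length - 2
      · rw [show x = ((x.toNat : Nat) : Int) from by omega]
        have := inner_eq nums hn x.toNat hxe acc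
        simp only [Int.toNat_natCast]
        exact this
      · rw [PySem.List.pyRange_one_eq_nil (by omega)]
        simp only [List.foldl_nil]
        unfold termG
        rw [nxt_ge nums x.toNat (by omega)]
        omega
    simp only [PySem.List.foldl_add]
    rw [PySem.List.pyRange_one, List.map_map,
      show (((nums.length : Int)) - 0).toNat = nums.length from by omega]
    rw [List.map_congr_left (g := termG nums) (by
      intro k hk
      simp only [Function.comp]
      rw [show ((0 : Int) + (k : Int)).toNat = k from by omega])]
    -- B side: the invariant
    rw [show ((nums.length : Int) - 2) = ((nums.length - 2 : Nat) : Int) from by omega,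
      show ((nums.length : Int) - 1) = ((nxtN nums ((nums.length - 2) + 1) : Nat) : Int) from by
        rw [nxt_ge nums ((nums.length - 2) + 1) (by omega)]; omega]
    rw [show (PySem.List.pyRange (((nums.length - 2 : Nat) : Int)) (-1) (-1)).foldl (fun (st : Int × Int) i =>
        let t := i + 1
        let nxt :=
          if t + 1 < (nums.length : Int) then
            if pvIdx nums (t - 1) ≥ pvIdx nums t ∧ pvIdx nums (t + 1) ≥ pvIdx nums t ∧
               (pvIdx nums (t - 1) = pvIdx nums t ∨ pvIdx nums (t + 1) = pvIdx nums t) then t else st.2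
          else st.2
        (st.1 + (nxt - i), nxt)) ((0 : Int), ((nxtN nums ((nums.length - 2) + 1) : Nat) : Int))
      = (PySem.List.pyRange (((nums.length - 2 : Nat) : Int)) (-1) (-1)).foldl (bBody nums)
          ((0 : Int), ((nxtN nums ((nums.length - 2) + 1) : Nat) : Int)) from rfl]
    rw [b_inv nums hn (nums.length - 2) 0 (by omega)]
    rw [show nums.length - 2 + 1 = nums.length - 1 from by omega]
    rw [show nums.length = (nums.length - 1) + 1 from by omega, List.range_succ]
    rw [List.map_append, List.sum_append]
    rw [show nums.length - 1 + 1 - 1 = nums.length - 1 from by omega]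
    simp only [List.map_cons, List.map_nil, List.sum_cons, List.sum_nil]
    unfold termG
    rw [nxt_ge nums (nums.length - 1) (by omega)]
    have hz : ((nums.length - 1 : Nat) : Int) - ((nums.length - 1 : Nat) : Int) = 0 := by omega
    rw [hz]
    ring

-- ===== VERDICT (by name: the statement is the Claim_ definition above) =====
theorem continues_sub_seq_spec : Claim_equal_continues_sub_seq := by
  intro nums _
  exact main_eq nums
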